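-- pv_equiv track=rewrite | github.com/junxin-yang/lpdr | ultralytics/pretice_mutilprocess.py | corners_to_bbox
-- ===== SOURCE A (Python) =====
-- def corners_to_bbox(corners):
--
--     x_coords = [point[0] for point in corners]
--     y_coords = [point[1] for point in corners]
--
--     # 计算边界框的坐标
--     x_min = min(x_coords)
--     y_min = min(y_coords)
--     x_max = max(x_coords)
--     y_max = max(y_coords)
--
--     bbox = [x_min, y_min, x_max, y_max]
--     return bbox
-- ===== SOURCE B (Python) =====
-- def corners_to_bbox(corners):
--     it = iter(corners)
--     try:
--         x_min, y_min = next(it)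
--     except StopIteration:
--         raise ValueError("corners_to_bbox: empty corner list")
--     x_max, y_max = x_min, y_min
--     for x, y in it:
--         if x < x_min:
--             x_min = x
--         elif x > x_max:
--             x_max = x
--         if y < y_min:
--             y_min = y
--         elif y > y_max:
--             y_max = y
--     return [x_min, y_min, x_max, y_max]
-- ===== Notes on version B (the rewrite author's own statement) =====
-- stated objective: alternative
-- what changed: Single pass over corners maintaining four running extrema by direct comparison, instead of building two coordinate lists and scanning them four times with min/max.
import Mathlib
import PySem

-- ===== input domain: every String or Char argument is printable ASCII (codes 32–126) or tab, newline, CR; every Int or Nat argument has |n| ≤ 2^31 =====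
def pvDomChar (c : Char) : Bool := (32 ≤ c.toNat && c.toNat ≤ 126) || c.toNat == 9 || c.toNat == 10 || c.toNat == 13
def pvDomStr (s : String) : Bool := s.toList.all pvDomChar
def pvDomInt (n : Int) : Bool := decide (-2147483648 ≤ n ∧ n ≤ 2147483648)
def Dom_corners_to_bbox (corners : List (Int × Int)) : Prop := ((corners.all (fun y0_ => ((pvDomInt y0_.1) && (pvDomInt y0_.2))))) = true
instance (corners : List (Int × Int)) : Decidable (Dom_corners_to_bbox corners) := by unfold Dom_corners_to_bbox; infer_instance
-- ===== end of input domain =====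

-- B computes the bbox in one pass with four running extrema instead of building two
-- coordinate lists and scanning them four times with min/max (objective: alternative).


-- ===== PORT A =====
def corners_to_bbox (corners : List (Int × Int)) : List Int :=
  let x_coords := corners.map (fun point => point.1)
  let y_coords := corners.map (fun point => point.2)
  match PySem.List.min? x_coords (fun v => v), PySem.List.min? y_coords (fun v => v),
        PySem.List.max? x_coords (fun v => v), PySem.List.max? y_coords (fun v => v) with
  | some x_min, some y_min, some x_max, some y_max => [x_min, y_min, x_max, y_max]
  | _, _, _, _ => []  -- min() on an empty list raises ValueError: outside Pre_

-- ===== PORT B =====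
def bboxStep (acc : Int × Int × Int × Int) (p : Int × Int) : Int × Int × Int × Int :=
  let (x_min, y_min, x_max, y_max) := acc
  let (x, y) := p
  let (x_min, x_max) := if x < x_min then (x, x_max) else if x > x_max then (x_min, x) else (x_min, x_max)
  let (y_min, y_max) := if y < y_min then (y, y_max) else if y > y_max then (y_min, y) else (y_min, y_max)
  (x_min, y_min, x_max, y_max)

def corners_to_bbox_alt (corners : List (Int × Int)) : List Int :=
  match corners with
  | [] => []  -- B raises ValueError on the empty list: outside Pre_
  | (x, y) :: rest =>
    let (x_min, y_min, x_max, y_max) := rest.foldl bboxStep (x, y, x, y)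
    [x_min, y_min, x_max, y_max]

-- ===== PRECONDITION & SPEC =====
-- Pre_ excludes only the empty list, on which A's min() raises ValueError (B raises too).
def Pre_corners_to_bbox (corners : List (Int × Int)) : Prop := corners ≠ []
instance (corners : List (Int × Int)) : Decidable (Pre_corners_to_bbox corners) := by unfold Pre_corners_to_bbox; infer_instance
def pvWitness_corners_to_bbox : (List (Int × Int)) := [(1, 2), (-3, 4)]
def Spec_corners_to_bbox (corners : List (Int × Int)) (out : List Int) : Prop := out = corners_to_bbox_alt corners
instance (corners : List (Int × Int)) (out : List Int) : Decidable (Spec_corners_to_bbox corners out) := by unfold Spec_corners_to_bbox; infer_instance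

-- ===== CLAIM (what is proved, stated in full; the proofs are below) =====
def Claim_equal_corners_to_bbox : Prop := ∀ (corners : List (Int × Int)), Dom_corners_to_bbox corners → Pre_corners_to_bbox corners → Spec_corners_to_bbox corners (corners_to_bbox corners)

-- ===== LEMMAS AND PROOFS =====
-- Loop invariant: with x_min ≤ x_max and y_min ≤ y_max, B's one-pass fold computes the four
-- independent running min/max folds that A's min()/max() calls amount to.
theorem bbox_foldl_eq (t : List (Int × Int)) : ∀ (a b c d : Int), a ≤ c → b ≤ d →
    t.foldl bboxStep (a, b, c, d) =
      ((t.map (fun p => p.1)).foldl min a, (t.map (fun p => p.2)).foldl min b,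
       (t.map (fun p => p.1)).foldl max c, (t.map (fun p => p.2)).foldl max d) := by
  induction t with
  | nil => intro a b c d _ _; simp
  | cons hd tl ih =>
    intro a b c d hac hbd
    obtain ⟨x, y⟩ := hd
    simp only [List.foldl_cons, List.map_cons]
    rw [show bboxStep (a, b, c, d) (x, y) = (min a x, min b y, max c x, max d y) by
      simp only [bboxStep]; split_ifs <;> simp <;> omega]
    exact ih _ _ _ _ (by omega) (by omega)

theorem corners_to_bbox_spec : Claim_equal_corners_to_bbox := by
  intro corners _ hpre
  unfold Spec_corners_to_bbox corners_to_bbox corners_to_bbox_alt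
  match corners with
  | [] => exact absurd rfl hpre
  | (x, y) :: rest =>
    simp only [List.map_cons, PySem.List.min?_id_cons, PySem.List.max?_id_cons,
      bbox_foldl_eq rest x y x y le_rfl le_rfl]
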